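-- pv_equiv track=rewrite | github.com/carlosp/advent-of-code | 2023/21-step-counter/solve_1.py | countPlotsReachable
-- ===== SOURCE A (Python) =====
-- def countPlotsReachable(garden, steps):
-- 	size, center = len(garden), len(garden) // 2
-- 	pending, visited, reachable = [(center, center)], set(), 0
--
-- 	for step in range(steps):
-- 		nextPending = []
--
-- 		for row, col in pending:
-- 			for drow, dcol in [(0, 1), (1, 0), (0, -1), (-1, 0)]:
-- 				nextRow, nextCol = row + drow, col + dcol
--
-- 				if 0 <= nextRow < size and 0 <= nextCol < size and garden[nextRow][nextCol] != '#' and (nextRow, nextCol) not in visited: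
-- 					visited.add((nextRow, nextCol))
-- 					nextPending += [(nextRow, nextCol)]
-- 					reachable += step % 2 != steps % 2
--
-- 		pending, nextPending = nextPending, []
--
-- 	return reachable
-- ===== SOURCE B (Python) =====
-- def countPlotsReachable(garden, steps):
-- 	size, center = len(garden), len(garden) // 2
-- 	plots, count = {(center, center)}, 0
--
-- 	for _ in range(steps):
-- 		plots = {(row + drow, col + dcol)
-- 		         for row, col in plots
-- 		         for drow, dcol in [(0, 1), (1, 0), (0, -1), (-1, 0)]
-- 		         if 0 <= row + drow < size and 0 <= col + dcol < size
-- 		         and garden[row + drow][col + dcol] != '#'}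
-- 		count = len(plots)
--
-- 	return count
-- ===== Notes on version B (the rewrite author's own statement) =====
-- stated objective: alternative
-- what changed: A runs a BFS with a visited set and counts newly discovered cells whose layer has the right parity inline; B keeps no visited set and no parity arithmetic: it iterates the 'reachable in exactly k steps' set (plots = open neighbours of plots, repeated steps times), remembering that set's size after each stride, which is correct because the grid graph is bipartite.
-- outside the precondition, e.g. on countPlotsReachable(['#.', '#'], 1): A returns 1, B returns 1; on countPlotsReachable(['..', '.'], 2): A raises IndexError, B raises IndexError; on countPlotsReachable(['###', '.#.', '###'], 3): A returns 2, B returns 0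
import Mathlib
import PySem

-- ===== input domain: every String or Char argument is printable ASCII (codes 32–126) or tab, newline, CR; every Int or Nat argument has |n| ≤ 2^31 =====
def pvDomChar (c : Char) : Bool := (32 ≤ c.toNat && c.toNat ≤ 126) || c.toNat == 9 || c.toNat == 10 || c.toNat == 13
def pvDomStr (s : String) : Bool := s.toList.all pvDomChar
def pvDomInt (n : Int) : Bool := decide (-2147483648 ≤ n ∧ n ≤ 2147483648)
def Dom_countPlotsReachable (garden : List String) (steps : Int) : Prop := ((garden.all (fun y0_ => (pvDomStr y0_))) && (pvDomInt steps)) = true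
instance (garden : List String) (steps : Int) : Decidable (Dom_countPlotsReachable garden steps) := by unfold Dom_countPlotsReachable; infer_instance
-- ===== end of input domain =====

-- B replaces A's visited-set BFS with inline parity counting by a visited-free iteration of the
-- "reachable in exactly k steps" set (plots := open neighbours of plots, repeated steps times),
-- remembering that set's size after each stride; the return values agree under Pre_ below.

-- shared totalization of the Python expression `garden[nr][nc] != '#'` guarded by the
-- bounds checks (exact wherever Python does not raise; Pre_ excludes the raising inputs)
def pvOpen (garden : List String) (size nr nc : Int) : Bool :=
  decide (0 ≤ nr) && decide (nr < size) && decide (0 ≤ nc) && decide (nc < size) &&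
  (match PySem.List.pyGet? garden nr with
   | some row =>
     match PySem.Str.pyGet? row nc with
     | some ch => ch != '#'
     | none => false
   | none => false)

-- the direction list [(0, 1), (1, 0), (0, -1), (-1, 0)] both Pythons iterate over
def pvDirs : List (Int × Int) := [(0, 1), (1, 0), (0, -1), (-1, 0)]

-- ===== PORT A =====
-- per-direction body of A's innermost loop; state = (nextPending, visited, reachable)
def aDir (garden : List String) (size steps step : Int) (rc : Int × Int)
    (acc : List (Int × Int) × PySem.Set (Int × Int) × Int) (dd : Int × Int) :
    List (Int × Int) × PySem.Set (Int × Int) × Int :=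
  let nr := rc.1 + dd.1
  let nc := rc.2 + dd.2
  if pvOpen garden size nr nc && !(PySem.Set.contains acc.2.1 (nr, nc)) then
    (acc.1 ++ [(nr, nc)], PySem.Set.add acc.2.1 (nr, nc),
      acc.2.2 + (if PySem.Int.mod step 2 != PySem.Int.mod steps 2 then 1 else 0))
  else acc

-- one iteration of A's `for step in range(steps)` loop
def aStep (garden : List String) (size steps : Int)
    (st : List (Int × Int) × PySem.Set (Int × Int) × Int) (step : Int) :
    List (Int × Int) × PySem.Set (Int × Int) × Int :=
  let r := st.1.foldl
    (fun acc rc => pvDirs.foldl (aDir garden size steps step rc) acc)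
    ([], st.2.1, st.2.2)
  (r.1, r.2.1, r.2.2)

def countPlotsReachable (garden : List String) (steps : Int) : Int :=
  let size : Int := (garden.length : Int)
  let center : Int := PySem.Int.floordiv (garden.length : Int) 2
  ((PySem.List.pyRange 0 steps 1).foldl (aStep garden size steps)
    ([(center, center)], PySem.Set.empty, 0)).2.2

-- ===== PORT B =====
-- one iteration of B's loop: plots := the set of open in-bounds neighbours of plots
def bStep (garden : List String) (size : Int) (plots : PySem.Set (Int × Int)) :
    PySem.Set (Int × Int) :=
  plots.foldl (fun acc rc =>
    pvDirs.foldl (fun acc2 dd =>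
      if pvOpen garden size (rc.1 + dd.1) (rc.2 + dd.2) then
        PySem.Set.add acc2 (rc.1 + dd.1, rc.2 + dd.2)
      else acc2) acc) PySem.Set.empty

def countPlotsReachable_alt (garden : List String) (steps : Int) : Int :=
  let size : Int := (garden.length : Int)
  let center : Int := PySem.Int.floordiv (garden.length : Int) 2
  ((PySem.List.pyRange 0 steps 1).foldl
    (fun st _ =>
      let plots := bStep garden size st.1
      (plots, (plots.length : Int)))
    (PySem.Set.ofList [(center, center)], 0)).2

-- ===== PRECONDITION & SPEC =====
-- For steps ≥ 1, Pre_ excludes: (a) grids with a row shorter than the grid height, on which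
-- A's `garden[nextRow][nextCol]` can raise IndexError (stated for all rows, slightly narrower
-- than the exact raising set), and (b) grids whose center cell is a rock '#', outside the
-- puzzle's premise that the walk starts on the open start plot 'S' (there A's and B's walk
-- counts from a rock are both accidental).
def Pre_countPlotsReachable (garden : List String) (steps : Int) : Prop :=
  steps ≤ 0 ∨
  ((∀ s ∈ garden, (garden.length : Int) ≤ PySem.Str.len s) ∧
   ((PySem.List.pyGet? garden (PySem.Int.floordiv (garden.length : Int) 2)).bind
     (fun row => PySem.Str.pyGet? row (PySem.Int.floordiv (garden.length : Int) 2))) ≠ some '#')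
instance (garden : List String) (steps : Int) : Decidable (Pre_countPlotsReachable garden steps) := by
  unfold Pre_countPlotsReachable; infer_instance

def pvWitness_countPlotsReachable : List String × Int := (["...", "...", "..."], 2)

def Spec_countPlotsReachable (garden : List String) (steps : Int) (out : Int) : Prop := out = countPlotsReachable_alt garden steps
instance (garden : List String) (steps : Int) (out : Int) : Decidable (Spec_countPlotsReachable garden steps out) := by
  unfold Spec_countPlotsReachable; infer_instance

-- ===== CLAIM (what is proved, stated in full; the proofs are below) =====
def Claim_equal_countPlotsReachable : Prop := ∀ (garden : List String) (steps : Int), Dom_countPlotsReachable garden steps → Pre_countPlotsReachable garden steps → Spec_countPlotsReachable garden steps (countPlotsReachable garden steps)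

-- ===== LEMMAS AND PROOFS =====

-- the four neighbour cells of a cell, and all neighbour candidates of a list of cells
def pvNbrs (p : Int × Int) : List (Int × Int) := pvDirs.map (fun d => (p.1 + d.1, p.2 + d.2))
def pvCands (P : List (Int × Int)) : List (Int × Int) := P.flatMap pvNbrs

-- A's inner two loops as one flat scan over the candidate list
def pvScan (garden : List String) (size inc : Int)
    (acc : List (Int × Int) × PySem.Set (Int × Int) × Int) (x : Int × Int) :
    List (Int × Int) × PySem.Set (Int × Int) × Int :=
  if pvOpen garden size x.1 x.2 && !(PySem.Set.contains acc.2.1 x) then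
    (acc.1 ++ [x], PySem.Set.add acc.2.1 x, acc.2.2 + inc)
  else acc

-- B's inner two loops as one flat scan over the candidate list
def pvBScan (garden : List String) (size : Int)
    (t : PySem.Set (Int × Int)) (x : Int × Int) : PySem.Set (Int × Int) :=
  if pvOpen garden size x.1 x.2 then PySem.Set.add t x else t

-- A's state after k iterations of the outer loop
def pvA (garden : List String) (steps : Int) : Nat → List (Int × Int) × PySem.Set (Int × Int) × Int
  | 0 => ([(PySem.Int.floordiv (garden.length : Int) 2, PySem.Int.floordiv (garden.length : Int) 2)],
          PySem.Set.empty, 0)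
  | k+1 => aStep garden (garden.length : Int) steps (pvA garden steps k) (k : Int)

def pvP (garden : List String) (steps : Int) (k : Nat) : List (Int × Int) := (pvA garden steps k).1
def pvV (garden : List String) (steps : Int) (k : Nat) : PySem.Set (Int × Int) := (pvA garden steps k).2.1
def pvR (garden : List String) (steps : Int) (k : Nat) : Int := (pvA garden steps k).2.2

-- B's plots set after k iterations
def pvB (garden : List String) : Nat → PySem.Set (Int × Int)
  | 0 => PySem.Set.ofList
      [(PySem.Int.floordiv (garden.length : Int) 2, PySem.Int.floordiv (garden.length : Int) 2)]
  | k+1 => bStep garden (garden.length : Int) (pvB garden k)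

-- B's full loop state after k iterations: the plots set together with the running count
def pvB2 (garden : List String) : Nat → PySem.Set (Int × Int) × Int
  | 0 => (PySem.Set.ofList
      [(PySem.Int.floordiv (garden.length : Int) 2, PySem.Int.floordiv (garden.length : Int) 2)], 0)
  | k+1 =>
    let plots := bStep garden (garden.length : Int) (pvB2 garden k).1
    (plots, (plots.length : Int))

-- the BFS layers of A with the parity of k, concatenated: the claimed value of B's set
def pvU (garden : List String) (steps : Int) : Nat → List (Int × Int)
  | 0 => [(PySem.Int.floordiv (garden.length : Int) 2, PySem.Int.floordiv (garden.length : Int) 2)]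
  | 1 => pvP garden steps 1
  | 2 => pvP garden steps 2
  | (k+3) => pvU garden steps (k+1) ++ pvP garden steps (k+3)

-- a foldl over range(steps) is the steps.toNat-th iterate
lemma pvFoldl_pyRange_iter {α : Type} (f : α → Int → α) (iter : Nat → α)
    (hs : ∀ k : Nat, iter (k+1) = f (iter k) (k : Int)) (steps : Int) :
    (PySem.List.pyRange 0 steps 1).foldl f (iter 0) = iter steps.toNat := by
  by_cases h : steps ≤ 0
  · rw [PySem.List.pyRange_one_eq_nil h, Int.toNat_of_nonpos h]
    rfl
  · have hn : steps = ((steps.toNat : Nat) : Int) := (Int.toNat_of_nonneg (by omega)).symm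
    rw [hn, Int.toNat_natCast]
    generalize steps.toNat = n
    induction n with
    | zero =>
      rw [show (((0:Nat)) : Int) = 0 from rfl, PySem.List.pyRange_one_eq_nil le_rfl]
      rfl
    | succ m ih =>
      have hc : ((m + 1 : Nat) : Int) = ((m : Nat) : Int) + 1 := by push_cast; ring
      rw [hc, PySem.List.pyRange_one_succ_right (by positivity), List.foldl_append, ih]
      exact (hs m).symm

lemma pvAStep_flat (garden : List String) (size steps step : Int)
    (st : List (Int × Int) × PySem.Set (Int × Int) × Int) :
    aStep garden size steps st step
      = (pvCands st.1).foldl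
          (pvScan garden size (if PySem.Int.mod step 2 != PySem.Int.mod steps 2 then 1 else 0))
          ([], st.2.1, st.2.2) := by
  show st.1.foldl (fun acc rc => pvDirs.foldl (aDir garden size steps step rc) acc)
      ([], st.2.1, st.2.2) = _
  rw [pvCands, List.foldl_flatMap]
  apply PySem.List.foldl_congr_mem
  intro acc rc _
  rw [pvNbrs, List.foldl_map]
  rfl

lemma pvBStep_flat (garden : List String) (size : Int) (S : PySem.Set (Int × Int)) :
    bStep garden size S = (pvCands S).foldl (pvBScan garden size) PySem.Set.empty := by
  show S.foldl _ PySem.Set.empty = _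
  rw [pvCands, List.foldl_flatMap]
  apply PySem.List.foldl_congr_mem
  intro acc rc _
  rw [pvNbrs, List.foldl_map]
  rfl

lemma pvScan_spec (garden : List String) (size inc : Int) :
    ∀ (L np0 : List (Int × Int)) (vis0 : PySem.Set (Int × Int)) (R0 : Int),
      ∃ Δ : List (Int × Int),
        L.foldl (pvScan garden size inc) (np0, vis0, R0)
          = (np0 ++ Δ, vis0 ++ Δ, R0 + inc * (Δ.length : Int)) ∧
        Δ.Nodup ∧
        (∀ x, x ∈ Δ ↔ (pvOpen garden size x.1 x.2 = true ∧ x ∈ L ∧ x ∉ vis0)) := by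
  intro L
  induction L with
  | nil =>
    intro np0 vis0 R0
    exact ⟨[], by simp, List.nodup_nil, by simp⟩
  | cons y L ih =>
    intro np0 vis0 R0
    by_cases hy : pvOpen garden size y.1 y.2 = true ∧ y ∉ vis0
    · have hc : PySem.Set.contains vis0 y = false := by
        rw [← Bool.not_eq_true, PySem.Set.contains_iff]
        exact hy.2
      have hstep : pvScan garden size inc (np0, vis0, R0) y
          = (np0 ++ [y], vis0 ++ [y], R0 + inc) := by
        simp [pvScan, hy.1, PySem.Set.add, hy.2]
      rw [List.foldl_cons, hstep]
      obtain ⟨Δ, h1, h2, h3⟩ := ih (np0 ++ [y]) (vis0 ++ [y]) (R0 + inc)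
      refine ⟨y :: Δ, ?_, ?_, ?_⟩
      · rw [h1]
        refine Prod.ext ?_ (Prod.ext ?_ ?_)
        · simp
        · simp
        · show R0 + inc + inc * (Δ.length : Int) = R0 + inc * ((y :: Δ).length : Int)
          simp only [List.length_cons]
          push_cast
          ring
      · refine List.nodup_cons.mpr ⟨?_, h2⟩
        intro hyΔ
        have := ((h3 y).mp hyΔ).2.2
        simp at this
      · intro x
        rw [List.mem_cons, h3 x]
        constructor
        · rintro (rfl | ⟨hx1, hx2, hx3⟩)
          · exact ⟨hy.1, List.mem_cons_self, hy.2⟩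
          · refine ⟨hx1, List.mem_cons_of_mem _ hx2, fun hmem => hx3 ?_⟩
            simp [hmem]
        · rintro ⟨hx1, hx2, hx3⟩
          by_cases hxy : x = y
          · exact Or.inl hxy
          · have hx2' : x ∈ L := by
              rcases List.mem_cons.mp hx2 with h' | h'
              · exact absurd h' hxy
              · exact h'
            refine Or.inr ⟨hx1, hx2', fun hmem => ?_⟩
            rcases List.mem_append.mp hmem with hv | hv
            · exact hx3 hv
            · simp only [List.mem_singleton] at hv
              exact hxy hv
    · have hstep : pvScan garden size inc (np0, vis0, R0) y = (np0, vis0, R0) := by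
        rcases not_and_or.mp hy with h | h
        · simp [pvScan, Bool.eq_false_iff.mpr h]
        · simp [pvScan]
          intro _
          exact not_not.mp h
      rw [List.foldl_cons, hstep]
      obtain ⟨Δ, h1, h2, h3⟩ := ih np0 vis0 R0
      refine ⟨Δ, h1, h2, fun x => ?_⟩
      rw [h3 x]
      constructor
      · rintro ⟨hx1, hx2, hx3⟩
        exact ⟨hx1, List.mem_cons_of_mem _ hx2, hx3⟩
      · rintro ⟨hx1, hx2, hx3⟩
        rcases List.mem_cons.mp hx2 with rfl | hx2'
        · exact absurd ⟨hx1, hx3⟩ hy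
        · exact ⟨hx1, hx2', hx3⟩

-- one outer iteration of A, characterised extensionally
lemma pvA_succ (garden : List String) (steps : Int) (k : Nat) :
    pvV garden steps (k+1) = pvV garden steps k ++ pvP garden steps (k+1) ∧
    pvR garden steps (k+1)
      = pvR garden steps k
        + (if PySem.Int.mod (k : Int) 2 != PySem.Int.mod steps 2 then 1 else 0)
          * ((pvP garden steps (k+1)).length : Int) ∧
    (pvP garden steps (k+1)).Nodup ∧
    (∀ x, x ∈ pvP garden steps (k+1)
        ↔ (pvOpen garden (garden.length : Int) x.1 x.2 = true
           ∧ x ∈ pvCands (pvP garden steps k) ∧ x ∉ pvV garden steps k)) := by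
  obtain ⟨Δ, h1, h2, h3⟩ :=
    pvScan_spec garden (garden.length : Int)
      (if PySem.Int.mod (k : Int) 2 != PySem.Int.mod steps 2 then 1 else 0)
      (pvCands (pvP garden steps k)) [] (pvV garden steps k) (pvR garden steps k)
  have hA : pvA garden steps (k+1)
      = ([] ++ Δ, pvV garden steps k ++ Δ,
         pvR garden steps k
           + (if PySem.Int.mod (k : Int) 2 != PySem.Int.mod steps 2 then 1 else 0)
             * (Δ.length : Int)) := by
    show aStep garden (garden.length : Int) steps (pvA garden steps k) (k : Int) = _
    rw [pvAStep_flat]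
    exact h1
  have hP : pvP garden steps (k+1) = Δ := by rw [pvP, hA]; simp
  refine ⟨?_, ?_, ?_, ?_⟩
  · rw [pvV, hA, hP]
  · rw [pvR, hA, hP]
  · rw [hP]; exact h2
  · intro x; rw [hP]; exact h3 x

lemma pvBScan_mem (garden : List String) (size : Int) :
    ∀ (L : List (Int × Int)) (t0 : PySem.Set (Int × Int)) (x : Int × Int),
      x ∈ L.foldl (pvBScan garden size) t0
        ↔ x ∈ t0 ∨ (pvOpen garden size x.1 x.2 = true ∧ x ∈ L) := by
  intro L
  induction L with
  | nil => intro t0 x; simp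
  | cons y L ih =>
    intro t0 x
    rw [List.foldl_cons]
    by_cases hy : pvOpen garden size y.1 y.2 = true
    · have : pvBScan garden size t0 y = PySem.Set.add t0 y := by simp [pvBScan, hy]
      rw [this, ih]
      rw [PySem.Set.mem_add]
      constructor
      · rintro ((h | rfl) | ⟨h1, h2⟩)
        · exact Or.inl h
        · exact Or.inr ⟨hy, List.mem_cons_self⟩
        · exact Or.inr ⟨h1, List.mem_cons_of_mem _ h2⟩
      · rintro (h | ⟨h1, h2⟩)
        · exact Or.inl (Or.inl h)
        · rcases List.mem_cons.mp h2 with rfl | h2'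
          · exact Or.inl (Or.inr rfl)
          · exact Or.inr ⟨h1, h2'⟩
    · have : pvBScan garden size t0 y = t0 := by simp [pvBScan, hy]
      rw [this, ih]
      constructor
      · rintro (h | ⟨h1, h2⟩)
        · exact Or.inl h
        · exact Or.inr ⟨h1, List.mem_cons_of_mem _ h2⟩
      · rintro (h | ⟨h1, h2⟩)
        · exact Or.inl h
        · rcases List.mem_cons.mp h2 with rfl | h2'
          · exact absurd h1 hy
          · exact Or.inr ⟨h1, h2'⟩

lemma pvBScan_nodup (garden : List String) (size : Int) :
    ∀ (L : List (Int × Int)) (t0 : PySem.Set (Int × Int)), t0.Nodup →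
      (L.foldl (pvBScan garden size) t0).Nodup := by
  intro L
  induction L with
  | nil => intro t0 h; exact h
  | cons y L ih =>
    intro t0 h
    rw [List.foldl_cons]
    apply ih
    by_cases hy : pvOpen garden size y.1 y.2 = true
    · simpa [pvBScan, hy] using PySem.Set.nodup_add t0 y h
    · simpa [pvBScan, hy] using h

lemma pvB_succ_mem (garden : List String) (k : Nat) (x : Int × Int) :
    x ∈ pvB garden (k+1)
      ↔ (pvOpen garden (garden.length : Int) x.1 x.2 = true
         ∧ ∃ p ∈ pvB garden k, x ∈ pvNbrs p) := by
  have : pvB garden (k+1) = (pvCands (pvB garden k)).foldl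
      (pvBScan garden (garden.length : Int)) PySem.Set.empty := pvBStep_flat _ _ _
  rw [this, pvBScan_mem]
  rw [pvCands, List.mem_flatMap]
  constructor
  · rintro (h | ⟨h1, h2⟩)
    · exact absurd h (List.not_mem_nil)
    · exact ⟨h1, h2⟩
  · rintro ⟨h1, h2⟩
    exact Or.inr ⟨h1, h2⟩

lemma pvB_nodup (garden : List String) : ∀ k, (pvB garden k).Nodup := by
  intro k
  cases k with
  | zero => exact PySem.Set.nodup_ofList _
  | succ m =>
    rw [show pvB garden (m+1) = _ from pvBStep_flat garden (garden.length : Int) (pvB garden m)]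
    exact pvBScan_nodup _ _ _ _ List.nodup_nil

-- visited after k iterations = union of the first k layers
lemma pvV_mem (garden : List String) (steps : Int) :
    ∀ k x, x ∈ pvV garden steps k ↔ ∃ j, 1 ≤ j ∧ j ≤ k ∧ x ∈ pvP garden steps j := by
  intro k
  induction k with
  | zero =>
    intro x
    constructor
    · intro h; exact absurd h (List.not_mem_nil)
    · rintro ⟨j, h1, h2, _⟩; omega
  | succ m ih =>
    intro x
    rw [(pvA_succ garden steps m).1, List.mem_append, ih]
    constructor
    · rintro (⟨j, h1, h2, h3⟩ | h)
      · exact ⟨j, h1, by omega, h3⟩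
      · exact ⟨m + 1, by omega, le_rfl, h⟩
    · rintro ⟨j, h1, h2, h3⟩
      rcases Nat.lt_or_ge j (m + 1) with hj | hj
      · exact Or.inl ⟨j, h1, by omega, h3⟩
      · have : j = m + 1 := by omega
        subst this
        exact Or.inr h3

lemma pvP_open (garden : List String) (steps : Int) (k : Nat) (x : Int × Int)
    (h : x ∈ pvP garden steps (k+1)) :
    pvOpen garden (garden.length : Int) x.1 x.2 = true := by
  exact (((pvA_succ garden steps k).2.2.2 x).mp h).1

lemma pvP_parent (garden : List String) (steps : Int) (k : Nat) (x : Int × Int)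
    (h : x ∈ pvP garden steps (k+1)) :
    ∃ p ∈ pvP garden steps k, x ∈ pvNbrs p := by
  have := (((pvA_succ garden steps k).2.2.2 x).mp h).2.1
  rw [pvCands, List.mem_flatMap] at this
  exact this

lemma pvP_disjoint (garden : List String) (steps : Int) {j j' : Nat} (x : Int × Int)
    (h1 : 1 ≤ j) (h2 : j < j') (h : x ∈ pvP garden steps j') : x ∉ pvP garden steps j := by
  intro hj
  obtain ⟨t, rfl⟩ : ∃ t, j' = t + 1 := ⟨j' - 1, by omega⟩
  have hfresh := (((pvA_succ garden steps t).2.2.2 x).mp h).2.2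
  exact hfresh ((pvV_mem garden steps t x).mpr ⟨j, h1, by omega, hj⟩)

-- the neighbour relation is symmetric, and flips the coordinate-sum parity
lemma pvNbrs_symm (x p : Int × Int) : x ∈ pvNbrs p ↔ p ∈ pvNbrs x := by
  obtain ⟨x1, x2⟩ := x
  obtain ⟨p1, p2⟩ := p
  simp [pvNbrs, pvDirs, Prod.ext_iff]
  omega

lemma pvNbrs_parity (x p : Int × Int) (h : x ∈ pvNbrs p) :
    x.1 + x.2 = p.1 + p.2 + 1 ∨ x.1 + x.2 = p.1 + p.2 - 1 := by
  obtain ⟨x1, x2⟩ := x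
  obtain ⟨p1, p2⟩ := p
  simp [pvNbrs, pvDirs, Prod.ext_iff] at h
  omega

-- cells of layer k have coordinate sum ≡ 2*center + k (mod 2): the grid graph is bipartite
lemma pvP_parity (garden : List String) (steps : Int) :
    ∀ k x, x ∈ pvP garden steps k →
      (x.1 + x.2) % 2 = (2 * PySem.Int.floordiv (garden.length : Int) 2 + (k : Int)) % 2 := by
  intro k
  induction k with
  | zero =>
    intro x h
    rcases List.mem_singleton.mp h with rfl
    simp
    omega
  | succ m ih =>
    intro x h
    obtain ⟨p, hp, hnb⟩ := pvP_parent garden steps m x h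
    have hpar := ih p hp
    have hsum := pvNbrs_parity x p hnb
    push_cast
    push_cast at hpar
    omega

-- an open neighbour of a layer-k cell is visited after k+1 iterations
lemma pvClosure (garden : List String) (steps : Int) (k : Nat) (x : Int × Int)
    (hop : pvOpen garden (garden.length : Int) x.1 x.2 = true)
    (hc : x ∈ pvCands (pvP garden steps k)) : x ∈ pvV garden steps (k+1) := by
  rw [(pvA_succ garden steps k).1, List.mem_append]
  by_cases hv : x ∈ pvV garden steps k
  · exact Or.inl hv
  · exact Or.inr (((pvA_succ garden steps k).2.2.2 x).mpr ⟨hop, hc, hv⟩)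

-- under Pre_, if the grid is nonempty the start plot is open
lemma pvStartOpen (garden : List String)
    (hrows : ∀ s ∈ garden, (garden.length : Int) ≤ PySem.Str.len s)
    (hch : ((PySem.List.pyGet? garden (PySem.Int.floordiv (garden.length : Int) 2)).bind
      (fun row => PySem.Str.pyGet? row (PySem.Int.floordiv (garden.length : Int) 2))) ≠ some '#')
    (hne : garden ≠ []) :
    pvOpen garden (garden.length : Int)
      (PySem.Int.floordiv (garden.length : Int) 2)
      (PySem.Int.floordiv (garden.length : Int) 2) = true := by
  have hlen : 0 < (garden.length : Int) := by
    have := List.length_pos_of_ne_nil hne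
    omega
  have hdiv : PySem.Int.floordiv (garden.length : Int) 2 = (garden.length : Int) / 2 :=
    PySem.Int.floordiv_eq_ediv_of_pos (by norm_num)
  set c : Int := PySem.Int.floordiv (garden.length : Int) 2 with hc
  have hc0 : 0 ≤ c := by omega
  have hc1 : c < (garden.length : Int) := by omega
  have hrow : PySem.List.pyGet? garden c = some garden[c.toNat] :=
    PySem.List.pyGet?_eq_some_getElem garden hc0 (by exact_mod_cast hc1)
  have hrmem : garden[c.toNat] ∈ garden := List.getElem_mem _
  have hrlen : (garden.length : Int) ≤ PySem.Str.len garden[c.toNat] := hrows _ hrmem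
  have hclen : c.toNat < garden[c.toNat].toList.length := by
    have := PySem.Str.len_eq garden[c.toNat]
    omega
  have hchr : PySem.Str.pyGet? garden[c.toNat] c = some garden[c.toNat].toList[c.toNat] := by
    rw [show PySem.Str.pyGet? garden[c.toNat] c
          = PySem.List.pyGet? garden[c.toNat].toList c from rfl]
    exact PySem.List.pyGet?_eq_some_getElem _ hc0 (by omega)
  rw [hrow] at hch
  simp only [Option.bind_some] at hch
  rw [hchr] at hch
  have hne' : garden[c.toNat].toList[c.toNat] ≠ '#' := fun hh => hch (by rw [hh])
  rw [pvOpen, hrow]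
  have hchr2 : PySem.List.pyGet? garden[c.toNat].toList c
      = some garden[c.toNat].toList[c.toNat] :=
    PySem.List.pyGet?_eq_some_getElem _ hc0 (by omega)
  simp [hc0, hc1, hchr2, hne']

lemma pvU_mem (garden : List String) (steps : Int) :
    ∀ m, 1 ≤ m → ∀ x,
      (x ∈ pvU garden steps m
        ↔ ∃ j, 1 ≤ j ∧ j ≤ m ∧ j % 2 = m % 2 ∧ x ∈ pvP garden steps j) := by
  intro m
  induction m using Nat.strong_induction_on with
  | _ m ih =>
    match m with
    | 0 => intro h; exact absurd h (by omega)
    | 1 =>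
      intro _ x
      constructor
      · intro h; exact ⟨1, le_rfl, le_rfl, rfl, h⟩
      · rintro ⟨j, h1, h2, h3, h4⟩
        have : j = 1 := by omega
        subst this; exact h4
    | 2 =>
      intro _ x
      constructor
      · intro h; exact ⟨2, by omega, le_rfl, rfl, h⟩
      · rintro ⟨j, h1, h2, h3, h4⟩
        have : j = 2 := by omega
        subst this; exact h4
    | (k+3) =>
      intro _ x
      show x ∈ pvU garden steps (k+1) ++ pvP garden steps (k+3) ↔ _
      rw [List.mem_append, ih (k+1) (by omega) (by omega) x]
      constructor
      · rintro (⟨j, h1, h2, h3, h4⟩ | h)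
        · exact ⟨j, h1, by omega, by omega, h4⟩
        · exact ⟨k+3, by omega, le_rfl, rfl, h⟩
      · rintro ⟨j, h1, h2, h3, h4⟩
        by_cases hj : j = k+3
        · subst hj; exact Or.inr h4
        · exact Or.inl ⟨j, h1, by omega, by omega, h4⟩

lemma pvU_nodup (garden : List String) (steps : Int) : ∀ m, (pvU garden steps m).Nodup := by
  intro m
  induction m using Nat.strong_induction_on with
  | _ m ih =>
    match m with
    | 0 => simp [pvU]
    | 1 => exact (pvA_succ garden steps 0).2.2.1
    | 2 => exact (pvA_succ garden steps 1).2.2.1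
    | (k+3) =>
      show (pvU garden steps (k+1) ++ pvP garden steps (k+3)).Nodup
      rw [List.nodup_append]
      refine ⟨ih (k+1) (by omega), (pvA_succ garden steps (k+2)).2.2.1, ?_⟩
      intro x hx y hy
      obtain ⟨j, h1, h2, _, h4⟩ := (pvU_mem garden steps (k+1) (by omega) x).mp hx
      intro hxy
      subst hxy
      exact pvP_disjoint garden steps (j := j) (j' := k+3) x h1 (by omega) hy h4

-- the simulation: B's set after m iterations has exactly the members of pvU m
theorem pvSim (garden : List String) (steps : Int)
    (hrows : ∀ s ∈ garden, (garden.length : Int) ≤ PySem.Str.len s)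
    (hch : ((PySem.List.pyGet? garden (PySem.Int.floordiv (garden.length : Int) 2)).bind
      (fun row => PySem.Str.pyGet? row (PySem.Int.floordiv (garden.length : Int) 2))) ≠ some '#') :
    ∀ m x, (x ∈ pvB garden m ↔ x ∈ pvU garden steps m) := by
  intro m
  induction m using Nat.strong_induction_on with
  | _ m ih =>
    match m with
    | 0 =>
      intro x
      show x ∈ PySem.Set.ofList _ ↔ _
      rw [PySem.Set.mem_ofList]
      exact Iff.rfl
    | 1 =>
      intro x
      rw [pvB_succ_mem]
      show _ ↔ x ∈ pvP garden steps 1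
      constructor
      · rintro ⟨hop, p, hp, hn⟩
        apply ((pvA_succ garden steps 0).2.2.2 x).mpr
        refine ⟨hop, ?_, ?_⟩
        · rw [pvCands, List.mem_flatMap]
          refine ⟨p, ?_, hn⟩
          have : p ∈ PySem.Set.ofList [((PySem.Int.floordiv (garden.length : Int) 2),
              (PySem.Int.floordiv (garden.length : Int) 2))] := hp
          rw [PySem.Set.mem_ofList] at this
          exact this
        · intro hv
          exact absurd hv List.not_mem_nil
      · intro h
        obtain ⟨hop, hc, -⟩ := ((pvA_succ garden steps 0).2.2.2 x).mp h
        rw [pvCands, List.mem_flatMap] at hc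
        obtain ⟨p, hp, hn⟩ := hc
        refine ⟨hop, p, ?_, hn⟩
        show p ∈ PySem.Set.ofList _
        rw [PySem.Set.mem_ofList]
        exact hp
    | 2 =>
      intro x
      rw [pvB_succ_mem]
      show _ ↔ x ∈ pvP garden steps 2
      constructor
      · rintro ⟨hop, p, hp, hn⟩
        have hp1 : p ∈ pvP garden steps 1 := (ih 1 (by omega) p).mp hp
        apply ((pvA_succ garden steps 1).2.2.2 x).mpr
        refine ⟨hop, by rw [pvCands, List.mem_flatMap]; exact ⟨p, hp1, hn⟩, ?_⟩
        intro hv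
        obtain ⟨j, hj1, hj2, hjm⟩ := (pvV_mem garden steps 1 x).mp hv
        have hj : j = 1 := by omega
        subst hj
        have e1 := pvP_parity garden steps 1 x hjm
        have e2 := pvP_parity garden steps 1 p hp1
        have e3 := pvNbrs_parity x p hn
        omega
      · intro h
        obtain ⟨hop, hc, -⟩ := ((pvA_succ garden steps 1).2.2.2 x).mp h
        rw [pvCands, List.mem_flatMap] at hc
        obtain ⟨p, hp, hn⟩ := hc
        exact ⟨hop, p, (ih 1 (by omega) p).mpr hp, hn⟩
    | (k+3) =>
      intro x
      rw [pvB_succ_mem]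
      constructor
      · rintro ⟨hop, p, hp, hn⟩
        have hpU := (ih (k+2) (by omega) p).mp hp
        obtain ⟨j, hj1, hj2, hj3, hjP⟩ := (pvU_mem garden steps (k+2) (by omega) p).mp hpU
        have hcand : x ∈ pvCands (pvP garden steps j) := by
          rw [pvCands, List.mem_flatMap]; exact ⟨p, hjP, hn⟩
        have hv := pvClosure garden steps j x hop hcand
        obtain ⟨i, hi1, hi2, hiP⟩ := (pvV_mem garden steps (j+1) x).mp hv
        have e1 := pvP_parity garden steps i x hiP
        have e2 := pvP_parity garden steps j p hjP
        have e3 := pvNbrs_parity x p hn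
        apply (pvU_mem garden steps (k+3) (by omega) x).mpr
        exact ⟨i, hi1, by omega, by omega, hiP⟩
      · intro hU
        obtain ⟨j, hj1, hj2, hj3, hjP⟩ := (pvU_mem garden steps (k+3) (by omega) x).mp hU
        by_cases hcase : j = k+3
        · subst hcase
          obtain ⟨p, hp, hn⟩ := pvP_parent garden steps (k+2) x hjP
          have hpB : p ∈ pvB garden (k+2) :=
            (ih (k+2) (by omega) p).mpr
              ((pvU_mem garden steps (k+2) (by omega) p).mpr ⟨k+2, by omega, le_rfl, rfl, hp⟩)
          exact ⟨pvP_open garden steps (k+2) x hjP, p, hpB, hn⟩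
        · obtain ⟨t, rfl⟩ : ∃ t, j = t + 1 := ⟨j - 1, by omega⟩
          have hxB : x ∈ pvB garden (k+1) :=
            (ih (k+1) (by omega) x).mpr
              ((pvU_mem garden steps (k+1) (by omega) x).mpr ⟨t+1, hj1, by omega, by omega, hjP⟩)
          obtain ⟨p, hpP, hn⟩ := pvP_parent garden steps t x hjP
          have hxop : pvOpen garden (garden.length : Int) x.1 x.2 = true :=
            pvP_open garden steps t x hjP
          have hpop : pvOpen garden (garden.length : Int) p.1 p.2 = true := by
            cases t with
            | zero =>
              rcases List.mem_singleton.mp hpP with rfl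
              apply pvStartOpen garden hrows hch
              intro hgnil
              subst hgnil
              simp [pvOpen] at hxop
              omega
            | succ t' => exact pvP_open garden steps t' p hpP
          have hpB : p ∈ pvB garden (k+2) :=
            (pvB_succ_mem garden (k+1) p).mpr ⟨hpop, x, hxB, (pvNbrs_symm x p).mp hn⟩
          exact ⟨hxop, p, hpB, hn⟩

-- one outer iteration adds the new layer's size to the counter iff its parity matches steps'
lemma pvR_succ (garden : List String) (steps : Int) (k : Nat) :
    pvR garden steps (k+1)
      = pvR garden steps k
        + (if ((k : Int) + 1) % 2 = steps % 2
           then ((pvP garden steps (k+1)).length : Int) else 0) := by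
  rw [(pvA_succ garden steps k).2.1]
  have hm : ∀ a : Int, PySem.Int.mod a 2 = a % 2 :=
    fun a => PySem.Int.mod_eq_emod_of_pos (by norm_num)
  rw [hm, hm]
  by_cases hp : ((k : Int) + 1) % 2 = steps % 2
  · have hb : ((k : Int) % 2 != steps % 2) = true := bne_iff_ne.mpr (by omega)
    rw [hb, if_pos hp]
    simp
  · have hb : ((k : Int) % 2 != steps % 2) = false := bne_eq_false_iff_eq.mpr (by omega)
    rw [hb, if_neg hp]
    simp

-- A's counter equals the size of pvU at any index of steps' parity
lemma pvR_eq (garden : List String) (steps : Int) :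
    ∀ m, 1 ≤ m → ((m : Nat) : Int) % 2 = steps % 2 →
      pvR garden steps m = ((pvU garden steps m).length : Int) := by
  intro m
  induction m using Nat.strong_induction_on with
  | _ m ih =>
    match m with
    | 0 => intro h; exact absurd h (by omega)
    | 1 =>
      intro _ hpar
      rw [pvR_succ, if_pos (by push_cast at hpar ⊢; omega)]
      show (0 : Int) + _ = _
      rw [zero_add]
      rfl
    | 2 =>
      intro _ hpar
      rw [pvR_succ, if_pos (by push_cast at hpar ⊢; omega),
          pvR_succ, if_neg (by push_cast at hpar ⊢; omega)]
      show (0 : Int) + _ = _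
      rw [zero_add]
      rfl
    | (k+3) =>
      intro _ hpar
      rw [pvR_succ, if_pos (by push_cast at hpar ⊢; omega),
          pvR_succ, if_neg (by push_cast at hpar ⊢; omega),
          ih (k+1) (by omega) (by omega) (by push_cast at hpar ⊢; omega)]
      show _ = ((pvU garden steps (k+1) ++ pvP garden steps (k+3)).length : Int)
      rw [List.length_append]
      push_cast
      ring

lemma pvCountA_eq (garden : List String) (steps : Int) :
    countPlotsReachable garden steps = pvR garden steps steps.toNat := by
  have h := pvFoldl_pyRange_iter (f := aStep garden (garden.length : Int) steps)
    (iter := pvA garden steps) (fun k => rfl) steps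
  show ((PySem.List.pyRange 0 steps 1).foldl (aStep garden (garden.length : Int) steps)
      (pvA garden steps 0)).2.2 = _
  rw [h]
  rfl

lemma pvB2_fst (garden : List String) : ∀ k, (pvB2 garden k).1 = pvB garden k := by
  intro k
  induction k with
  | zero => rfl
  | succ m ih => show bStep garden (garden.length : Int) (pvB2 garden m).1 = _; rw [ih]; rfl

lemma pvB2_snd_succ (garden : List String) (k : Nat) :
    (pvB2 garden (k+1)).2 = ((pvB garden (k+1)).length : Int) := by
  show ((bStep garden (garden.length : Int) (pvB2 garden k).1).length : Int) = _
  rw [pvB2_fst]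
  rfl

lemma pvCountB_eq (garden : List String) (steps : Int) :
    countPlotsReachable_alt garden steps = (pvB2 garden steps.toNat).2 := by
  have h := pvFoldl_pyRange_iter
    (f := fun st _ =>
      let plots := bStep garden (garden.length : Int) st.1
      (plots, (plots.length : Int)))
    (iter := pvB2 garden) (fun k => rfl) steps
  show ((PySem.List.pyRange 0 steps 1).foldl
      (fun st _ =>
        let plots := bStep garden (garden.length : Int) st.1
        (plots, ((plots.length : Nat) : Int)))
      (pvB2 garden 0)).2 = _
  rw [h]

-- ===== VERDICT (by name: the statements are the Claim_ definitions above) =====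
theorem countPlotsReachable_spec : Claim_equal_countPlotsReachable := by
  intro garden steps _ hpre
  show countPlotsReachable garden steps = countPlotsReachable_alt garden steps
  rw [pvCountA_eq, pvCountB_eq]
  by_cases hs : steps ≤ 0
  · rw [show steps.toNat = 0 by omega]
    rfl
  · obtain ⟨hrows, hch⟩ : (∀ s ∈ garden, (garden.length : Int) ≤ PySem.Str.len s) ∧ _ := by
      rcases hpre with h | h
      · exact absurd h hs
      · exact h
    obtain ⟨n, hn⟩ : ∃ n, steps.toNat = n + 1 := ⟨steps.toNat - 1, by omega⟩
    rw [hn, pvB2_snd_succ]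
    have hperm : (pvB garden (n+1)).length = (pvU garden steps (n+1)).length :=
      List.Perm.length_eq
        ((List.perm_ext_iff_of_nodup (pvB_nodup garden (n+1))
          (pvU_nodup garden steps (n+1))).mpr (pvSim garden steps hrows hch (n+1)))
    rw [pvR_eq garden steps (n+1) (by omega) (by omega), hperm]
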